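-- pv_equiv track=rewrite | github.com/VorobyovR/Developer_Programmer | L4_sem/A4.5_HW.py | get_ones
-- ===== SOURCE A (Python) =====
-- def get_ones(line):
--     list_temp = []
--     last = 0
--     positive = True
--     for i, item in enumerate(line):
--         if item in {'+', '-'}:
--             if positive:
--                 list_temp.append(line[last:i])
--             else:
--                 list_temp.append('-' + line[last:i])
--             last = i + 1
--             positive = item == '+'
--     if positive:
--         list_temp.append(line[last:])
--     else:
--         list_temp.append('-' + line[last:])
--     return list_temp
-- ===== SOURCE B (Python) =====
-- import re
--
-- def get_ones(line):
--     parts = re.split('([+-])', line)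
--     result = [parts[0]]
--     for k in range(1, len(parts), 2):
--         sep, term = parts[k], parts[k + 1]
--         result.append(term if sep == '+' else '-' + term)
--     return result
-- ===== Notes on version B (the rewrite author's own statement) =====
-- stated objective: idiomatic
-- what changed: B replaces A's index-tracking character scan with slices by a regex split that keeps the plus/minus separators, producing an interleaved term/separator list, then a pairwise walk attaching each sign to its following term.
import Mathlib
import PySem

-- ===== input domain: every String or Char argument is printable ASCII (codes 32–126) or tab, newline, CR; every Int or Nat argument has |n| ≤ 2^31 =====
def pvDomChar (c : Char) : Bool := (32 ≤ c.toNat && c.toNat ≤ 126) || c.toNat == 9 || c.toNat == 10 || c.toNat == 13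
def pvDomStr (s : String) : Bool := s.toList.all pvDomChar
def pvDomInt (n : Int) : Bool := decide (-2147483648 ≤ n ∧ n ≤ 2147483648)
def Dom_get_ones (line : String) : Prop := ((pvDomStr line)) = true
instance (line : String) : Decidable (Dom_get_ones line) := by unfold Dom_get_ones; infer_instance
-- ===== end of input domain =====

-- B re-implements the split-into-signed-terms scan with re.split('([+-])') plus a pairwise
-- walk over the interleaved (separator, term) list: idiomatic decomposition, same O(n) cost.

-- ===== PORT A =====
-- the body of A's for-loop (state: list_temp, last, positive; p = (i, item))
def get_ones_stepA (cs : List Char) (s : List String × Int × Bool) (p : Int × Char) :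
    List String × Int × Bool :=
  if p.2 = '+' ∨ p.2 = '-' then
    (s.1 ++ [if s.2.2 then String.ofList (PySem.List.slice cs (some s.2.1) (some p.1))
             else String.ofList ('-' :: PySem.List.slice cs (some s.2.1) (some p.1))],
     p.1 + 1, decide (p.2 = '+'))
  else s

def get_ones (line : String) : List String :=
  let cs := line.toList
  let st := (PySem.List.enumerate cs 0).foldl (get_ones_stepA cs) ([], 0, true)
  st.1 ++ [if st.2.2 then String.ofList (PySem.List.slice cs (some st.2.1) none)
           else String.ofList ('-' :: PySem.List.slice cs (some st.2.1) none)]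

-- ===== PORT B =====
-- re.split('([+-])', line): interleaved [term0, sep1, term1, …] (hand port, exact: the
-- pattern matches one '+' or '-' and the capturing group keeps it)
def get_ones_splitSigns : List Char → List (List Char)
  | [] => [[]]
  | c :: cs =>
    if c = '+' ∨ c = '-' then [] :: [c] :: get_ones_splitSigns cs
    else
      match get_ones_splitSigns cs with
      | t :: ts => (c :: t) :: ts
      | [] => [[c]]

-- the loop over the remaining parts two at a time: (sep, term) pairs
def get_ones_pairs : List (List Char) → List String
  | s :: t :: rest =>
    (if s = ['+'] then String.ofList t else String.ofList ('-' :: t)) :: get_ones_pairs rest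
  | _ => []

def get_ones_alt (line : String) : List String :=
  match get_ones_splitSigns line.toList with
  | [] => []          -- unreachable: re.split always returns a non-empty list
  | t :: rest => String.ofList t :: get_ones_pairs rest

-- ===== PRECONDITION & SPEC =====
def Spec_get_ones (line : String) (out : List String) : Prop := out = get_ones_alt line
instance (line : String) (out : List String) : Decidable (Spec_get_ones line out) := by
  unfold Spec_get_ones; infer_instance

-- ===== CLAIM (what is proved, stated in full; the proofs are below) =====
def Claim_equal_get_ones : Prop := ∀ (line : String), Dom_get_ones line → Spec_get_ones line (get_ones line)

-- ===== LEMMAS AND PROOFS =====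

-- proof-side common form: scan with the pending term `cur` carried explicitly
def pvEmit (pos : Bool) (cur : List Char) : String :=
  if pos then String.ofList cur else String.ofList ('-' :: cur)

def pvGo : Bool → List Char → List Char → List String
  | pos, cur, [] => [pvEmit pos cur]
  | pos, cur, c :: cs =>
    if c = '+' ∨ c = '-' then pvEmit pos cur :: pvGo (c = '+') [] cs
    else pvGo pos (cur ++ [c]) cs

lemma splitSigns_ne_nil (cs : List Char) : get_ones_splitSigns cs ≠ [] := by
  induction cs with
  | nil => simp [get_ones_splitSigns]
  | cons c cs ih =>
    simp only [get_ones_splitSigns]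
    split
    · simp
    · cases h : get_ones_splitSigns cs with
      | nil => exact absurd h ih
      | cons t ts => simp

lemma A_loop (full : List Char) :
    ∀ (suf cur : List Char) (acc : List String) (ℓ : Nat) (pos : Bool),
      full.drop ℓ = cur ++ suf →
      (let st := (PySem.List.enumerate suf ((ℓ : Int) + (cur.length : Int))).foldl
          (get_ones_stepA full) (acc, (ℓ : Int), pos)
       st.1 ++ [if st.2.2 then String.ofList (PySem.List.slice full (some st.2.1) none)
                else String.ofList ('-' :: PySem.List.slice full (some st.2.1) none)])
      = acc ++ pvGo pos cur suf := by
  intro suf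
  induction suf with
  | nil =>
    intro cur acc ℓ pos h
    simp only [PySem.List.enumerate_nil, List.foldl_nil, pvGo]
    rw [PySem.List.slice_from_natCast, h]
    simp [pvEmit]
  | cons c suf ih =>
    intro cur acc ℓ pos h
    rw [PySem.List.enumerate_cons, List.foldl_cons]
    by_cases hc : c = '+' ∨ c = '-'
    · have hslice : PySem.List.slice full (some (ℓ : Int)) (some ((ℓ : Int) + (cur.length : Int)))
          = cur := by
        rw [PySem.List.slice_natCast_add, h]
        simp
      have hstep : get_ones_stepA full (acc, (ℓ : Int), pos) ((ℓ : Int) + (cur.length : Int), c)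
          = (acc ++ [pvEmit pos cur], ((ℓ + cur.length + 1 : Nat) : Int), decide (c = '+')) := by
        unfold get_ones_stepA
        rw [if_pos hc]
        simp only [hslice, pvEmit]
        refine congrArg₂ Prod.mk ?_ (congrArg₂ Prod.mk (by push_cast; ring) rfl)
        split <;> rfl
      rw [hstep]
      have hdrop : full.drop (ℓ + cur.length + 1) = suf := by
        have : full.drop (ℓ + cur.length + 1) = (full.drop ℓ).drop (cur.length + 1) := by
          rw [List.drop_drop]; ring_nf
        rw [this, h]
        simp
      have := ih [] (acc ++ [pvEmit pos cur]) (ℓ + cur.length + 1) (decide (c = '+'))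
        (by simpa using hdrop)
      simp only [List.length_nil, Nat.cast_zero, add_zero] at this
      have harg : (ℓ : Int) + (cur.length : Int) + 1 = ((ℓ + cur.length + 1 : Nat) : Int) := by
        push_cast; ring
      rw [harg, this]
      simp only [pvGo, hc, if_pos]
      by_cases hp : c = '+'
      · simp [hp]
      · have hm : c = '-' := hc.resolve_left hp
        simp [hm]
    · have hstep : get_ones_stepA full (acc, (ℓ : Int), pos) ((ℓ : Int) + (cur.length : Int), c)
          = (acc, (ℓ : Int), pos) := by
        simp [get_ones_stepA, hc]
      rw [hstep]
      have hdrop : full.drop ℓ = (cur ++ [c]) ++ suf := by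
        rw [h]; simp
      have := ih (cur ++ [c]) acc ℓ pos hdrop
      have harg : (ℓ : Int) + (cur.length : Int) + 1
          = (ℓ : Int) + (((cur ++ [c]).length : Nat) : Int) := by
        simp; ring
      rw [harg, this]
      simp [pvGo, hc]

lemma B_eq_go : ∀ (cs cur : List Char) (pos : Bool) (t : List Char) (rest : List (List Char)),
    get_ones_splitSigns cs = t :: rest →
    pvGo pos cur cs = pvEmit pos (cur ++ t) :: get_ones_pairs rest := by
  intro cs
  induction cs with
  | nil =>
    intro cur pos t rest h
    simp only [get_ones_splitSigns] at h
    cases h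
    simp [pvGo, get_ones_pairs]
  | cons c cs ih =>
    intro cur pos t rest h
    by_cases hc : c = '+' ∨ c = '-'
    · simp only [get_ones_splitSigns, hc, if_pos] at h
      cases h
      cases h2 : get_ones_splitSigns cs with
      | nil => exact absurd h2 (splitSigns_ne_nil cs)
      | cons t' rest' =>
        simp only [pvGo, hc, if_pos]
        rw [ih [] (c = '+') t' rest' h2]
        simp only [List.nil_append, get_ones_pairs, List.append_nil]
        congr 1
        by_cases hp : c = '+'
        · simp [hp, pvEmit]
        · have hm : c = '-' := hc.resolve_left hp
          simp [hm, pvEmit]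
    · simp only [get_ones_splitSigns, hc, if_false] at h
      cases h2 : get_ones_splitSigns cs with
      | nil => exact absurd h2 (splitSigns_ne_nil cs)
      | cons t' rest' =>
        rw [h2] at h
        obtain ⟨ht, hr⟩ := List.cons_eq_cons.mp h
        subst ht; subst hr
        simp only [pvGo, hc, if_false]
        rw [ih (cur ++ [c]) pos t' rest' h2]
        simp

-- ===== VERDICT (by name: the statement is the Claim_ definition above) =====
theorem get_ones_spec : Claim_equal_get_ones := by
  intro line _
  unfold Spec_get_ones get_ones get_ones_alt
  have hA := A_loop line.toList line.toList [] [] 0 true (by simp)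
  simp only [List.length_nil, Nat.cast_zero, add_zero, List.nil_append] at hA
  rw [hA]
  cases h : get_ones_splitSigns line.toList with
  | nil => exact absurd h (splitSigns_ne_nil line.toList)
  | cons t rest =>
    rw [B_eq_go line.toList [] true t rest h]
    simp [pvEmit]
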